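-- pv_equiv track=rewrite | github.com/EricHeGitHub/python-predicting-stress-in-english-words | methods.py | partial_string_division_test
-- ===== SOURCE A (Python) =====
-- def isVowel(pronunciation):
--     vowel = ['AA','AE','AH', 'AO', 'AW', 'AY', 'EH', 'ER','EY', 'IH','IY','OW','OY','UH', 'UW']
--     if pronunciation in vowel:
--         return 1
--     return 0
--
-- def partial_string_division_test(word):
--     pronunciations_no_int = word.copy()
--     substrings = []
--     consnt_before_v = ' '
--     previous_pronunciation = ' '
--     for pronunciation_index in range(len(pronunciations_no_int)):
--         if isVowel(pronunciations_no_int[pronunciation_index]) ==1: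
--             vowel_current = pronunciations_no_int[pronunciation_index ]
--             if isVowel(previous_pronunciation )==1:
--                 consnt_before_v  = ' '
--
--             substr =consnt_before_v + vowel_current
--             substrings.append(substr)
--             previous_pronunciation = vowel_current
--         else:
--             consnt_before_v  = pronunciations_no_int[pronunciation_index]
--             previous_pronunciation = pronunciations_no_int[pronunciation_index]
--     for i in range(len(substrings)):
--         substrings[i]= ''.join([j for j in substrings[i] if j!= ' '])
--
--     while len(substrings)<4:
--         substrings.append(' ')
--     return substrings
-- ===== SOURCE B (Python) =====
-- VOWELS = frozenset(['AA', 'AE', 'AH', 'AO', 'AW', 'AY', 'EH', 'ER', 'EY',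
--                     'IH', 'IY', 'OW', 'OY', 'UH', 'UW'])
--
--
-- def _strip_spaces(s):
--     return ''.join(ch for ch in s if ch != ' ')
--
--
-- def partial_string_division_test(word):
--     # variable-step cursor: consume a lone vowel, or fuse a consonant with the
--     # vowel right after it (consuming both); no state is carried between steps.
--     subs = []
--     i, n = 0, len(word)
--     while i < n:
--         t = word[i]
--         if t in VOWELS:
--             subs.append(_strip_spaces(t))
--             i += 1
--         elif i + 1 < n and word[i + 1] in VOWELS:
--             subs.append(_strip_spaces(t + word[i + 1]))
--             i += 2
--         else:
--             i += 1
--     return subs + [' '] * (4 - len(subs))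
-- ===== Notes on version B (the rewrite author's own statement) =====
-- stated objective: simpler
-- what changed: Replaces A's stateful single pass (carried consnt_before_v/previous_pronunciation accumulators plus a separate space-stripping pass and a padding while-loop) with a stateless variable-step cursor that consumes a lone vowel or fuses a consonant with the vowel immediately after it (consuming both tokens), stripping as it emits, with arithmetic padding.
import Mathlib
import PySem

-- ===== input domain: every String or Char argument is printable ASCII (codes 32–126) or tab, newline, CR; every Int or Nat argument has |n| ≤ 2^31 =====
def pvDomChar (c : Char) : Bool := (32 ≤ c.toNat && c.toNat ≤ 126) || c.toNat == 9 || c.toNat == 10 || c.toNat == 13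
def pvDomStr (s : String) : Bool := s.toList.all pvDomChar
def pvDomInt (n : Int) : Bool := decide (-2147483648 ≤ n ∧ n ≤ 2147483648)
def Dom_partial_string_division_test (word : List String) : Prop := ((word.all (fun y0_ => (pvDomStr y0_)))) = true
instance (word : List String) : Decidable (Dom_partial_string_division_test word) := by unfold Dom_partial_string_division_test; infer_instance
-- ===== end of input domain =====

-- B replaces A's stateful pass (carried consonant/previous-token accumulators and a
-- separate stripping pass) with a stateless variable-step cursor fusing a consonant
-- with the vowel right after it (objective: simpler).

-- ===== PORT A =====
-- the module-level vowel list of Source A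
def pvVowelList : List String :=
  ["AA","AE","AH","AO","AW","AY","EH","ER","EY","IH","IY","OW","OY","UH","UW"]

def isVowel (pronunciation : String) : Int :=
  if pronunciation ∈ pvVowelList then 1 else 0

-- ''.join([j for j in s if j != ' '])
def pvStripA (s : String) : String := String.ofList (s.toList.filter (fun j => j ≠ ' '))

-- the body of A's for-loop; state = (substrings, consnt_before_v, previous_pronunciation)
def pvStepA (st : List String × String × String) (p : String) : List String × String × String :=
  if isVowel p == 1 then
    let consnt := if isVowel st.2.2 == 1 then " " else st.2.1
    (st.1 ++ [consnt ++ p], consnt, p)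
  else
    (st.1, p, p)

-- while len(substrings) < 4: substrings.append(' ')
def pvPadA (xs : List String) : List String :=
  if xs.length < 4 then pvPadA (xs ++ [" "]) else xs
termination_by 4 - xs.length
decreasing_by simp_all; omega

def partial_string_division_test (word : List String) : List String :=
  let r := word.foldl pvStepA ([], " ", " ")
  pvPadA (r.1.map pvStripA)

-- ===== PORT B =====
def pvVowelSet : List String :=
  ["AA","AE","AH","AO","AW","AY","EH","ER","EY","IH","IY","OW","OY","UH","UW"]

-- ''.join(ch for ch in s if ch != ' ')
def pvStripB (s : String) : String := String.ofList (s.toList.filter (fun ch => ch ≠ ' '))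

-- Source B's while loop over the cursor i, as recursion on the suffix word[i:],
-- consuming one token (a lone vowel, or a token followed by a non-vowel) or
-- two tokens (consonant fused with the vowel after it) per step
def pvGoB : List String → List String
  | [] => []
  | t :: rest =>
    if t ∈ pvVowelSet then pvStripB t :: pvGoB rest
    else
      match rest with
      | [] => []
      | b :: rest2 =>
        if b ∈ pvVowelSet then pvStripB (t ++ b) :: pvGoB rest2
        else pvGoB (b :: rest2)

def partial_string_division_test_alt (word : List String) : List String :=
  let subs := pvGoB word
  -- Nat subtraction clamps at 0, exactly like Python's [' '] * (negative)
  subs ++ List.replicate (4 - subs.length) " "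

-- ===== PRECONDITION & SPEC =====
def Spec_partial_string_division_test (word : List String) (out : List String) : Prop := out = partial_string_division_test_alt word
instance (word : List String) (out : List String) : Decidable (Spec_partial_string_division_test word out) := by unfold Spec_partial_string_division_test; infer_instance

-- ===== CLAIM (what is proved, stated in full; the proofs are below) =====
def Claim_equal_partial_string_division_test : Prop := ∀ (word : List String), Dom_partial_string_division_test word → Spec_partial_string_division_test word (partial_string_division_test word)

-- ===== LEMMAS AND PROOFS =====

theorem stripA_eq_stripB (s : String) : pvStripA s = pvStripB s := rfl

theorem vowList_eq : pvVowelList = pvVowelSet := rfl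

theorem isVowel_mem {p : String} (h : p ∈ pvVowelSet) : (isVowel p == 1) = true := by
  unfold isVowel; rw [vowList_eq]; simp only [if_pos h]; rfl

theorem isVowel_not_mem {p : String} (h : p ∉ pvVowelSet) : (isVowel p == 1) = false := by
  unfold isVowel; rw [vowList_eq]; simp only [if_neg h]; rfl

theorem strip_space_append (b : String) : pvStripB (" " ++ b) = pvStripB b := by
  simp [pvStripB]

-- unfolding equations for pvGoB
theorem goB_nil : pvGoB [] = [] := by
  conv_lhs => rw [pvGoB.eq_def]

theorem goB_vowel {t : String} (h : t ∈ pvVowelSet) (rest : List String) :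
    pvGoB (t :: rest) = pvStripB t :: pvGoB rest := by
  conv_lhs => rw [pvGoB.eq_def]
  simp [h]

theorem goB_cons_nil {t : String} (h : t ∉ pvVowelSet) : pvGoB [t] = [] := by
  conv_lhs => rw [pvGoB.eq_def]
  simp [h]

theorem goB_cons_vowel {t b : String} (ht : t ∉ pvVowelSet) (hb : b ∈ pvVowelSet)
    (rest : List String) : pvGoB (t :: b :: rest) = pvStripB (t ++ b) :: pvGoB rest := by
  conv_lhs => rw [pvGoB.eq_def]
  simp [ht, hb]

theorem goB_cons_cons {t b : String} (ht : t ∉ pvVowelSet) (hb : b ∉ pvVowelSet)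
    (rest : List String) : pvGoB (t :: b :: rest) = pvGoB (b :: rest) := by
  conv_lhs => rw [pvGoB.eq_def]
  simp [ht, hb]

-- loop invariant relating A's stateful fold to B's stateless cursor: when the
-- previous token was a vowel the pending consonant is irrelevant, otherwise the
-- pending consonant equals the previous token and B sees it as the list head
theorem loopA_eq (ws : List String) (acc : List String) (c prev : String)
    (h : prev ∈ pvVowelSet ∨ c = prev) :
    (ws.foldl pvStepA (acc, c, prev)).1.map pvStripA
      = acc.map pvStripA ++ (if prev ∈ pvVowelSet then pvGoB ws else pvGoB (prev :: ws)) := by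
  induction ws generalizing acc c prev with
  | nil =>
    by_cases hp : prev ∈ pvVowelSet
    · simp [hp, goB_nil]
    · simp [hp, goB_cons_nil hp]
  | cons t rest ih =>
    by_cases hv : t ∈ pvVowelSet
    · have hstep : pvStepA (acc, c, prev) t
          = (acc ++ [(if isVowel prev == 1 then " " else c) ++ t],
             (if isVowel prev == 1 then " " else c), t) := by
        simp [pvStepA, isVowel_mem hv]
      rw [List.foldl_cons, hstep,
        ih (acc ++ [(if isVowel prev == 1 then " " else c) ++ t])
           (if isVowel prev == 1 then " " else c) t (Or.inl hv)]
      by_cases hp : prev ∈ pvVowelSet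
      · rw [if_pos hv, if_pos hp, goB_vowel hv, isVowel_mem hp, if_pos rfl]
        simp [strip_space_append, stripA_eq_stripB]
      · rcases h with h | h
        · exact absurd h hp
        · subst h
          rw [if_pos hv, if_neg hp, goB_cons_vowel hp hv, isVowel_not_mem hp]
          simp [stripA_eq_stripB]
    · have hstep : pvStepA (acc, c, prev) t = (acc, t, t) := by
        simp [pvStepA, isVowel_not_mem hv]
      rw [List.foldl_cons, hstep, ih acc t t (Or.inr rfl)]
      by_cases hp : prev ∈ pvVowelSet
      · rw [if_neg hv, if_pos hp]
      · rw [if_neg hv, if_neg hp, goB_cons_cons hp hv]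

theorem pad_eq (xs : List String) : pvPadA xs = xs ++ List.replicate (4 - xs.length) " " := by
  fun_induction pvPadA xs with
  | case1 xs h ih =>
    rw [ih, List.append_assoc]
    congr 1
    have h4 : 4 - xs.length = (4 - (xs.length + 1)) + 1 := by omega
    simp [h4, List.replicate_succ]
  | case2 xs h =>
    have : ¬ xs.length < 4 := h
    simp; omega

-- ===== VERDICT (by name: the statement is the Claim_ definition above) =====
theorem partial_string_division_test_spec : Claim_equal_partial_string_division_test := by
  intro word _
  unfold Spec_partial_string_division_test partial_string_division_test partial_string_division_test_alt
  change pvPadA ((word.foldl pvStepA ([], " ", " ")).1.map pvStripA) = _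
  rw [loopA_eq word [] " " " " (Or.inr rfl), pad_eq]
  have hsp : (" " : String) ∉ pvVowelSet := by decide
  have hgo : pvGoB (" " :: word) = pvGoB word := by
    cases word with
    | nil => rw [goB_cons_nil hsp, goB_nil]
    | cons h rest =>
      by_cases hv : h ∈ pvVowelSet
      · rw [goB_cons_vowel hsp hv, goB_vowel hv, strip_space_append]
      · rw [goB_cons_cons hsp hv]
  simp [hsp, hgo]
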